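-- pv_equiv track=rewrite | github.com/A-MAD21/CMapper | Modules/mikrotik_mac_discovery/mikrotik_mac_discovery.py | _parse_detail_records
-- ===== SOURCE A (Python) =====
-- from typing import Dict, Any, List, Optional, Tuple
--
-- def _parse_detail_records(output: str) -> List[Dict[str, str]]:
--     records: List[Dict[str, str]] = []
--     current: Dict[str, str] = {}
--     for raw_line in output.splitlines():
--         line = raw_line.strip()
--         if not line:
--             continue
--         if line[0].isdigit() and " " in line:
--             if current:
--                 records.append(current)
--                 current = {}
--             line = line.split(" ", 1)[1]
--         for token in line.split():
--             if "=" not in token: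
--                 continue
--             key, value = token.split("=", 1)
--             current[key.strip()] = value.strip()
--     if current:
--         records.append(current)
--     return records
-- ===== SOURCE B (Python) =====
-- def _parse_detail_records(output):
--     # Pass 1: segment stripped non-empty lines into record chunks.
--     chunks = []
--     current = []
--     for raw_line in output.splitlines():
--         line = raw_line.strip()
--         if not line:
--             continue
--         if line[0].isdigit() and " " in line:
--             if current:
--                 chunks.append(current)
--             current = [line.split(" ", 1)[1]]
--         else:
--             current.append(line)
--     if current:
--         chunks.append(current)
--     # Pass 2: parse each chunk's key=value tokens into one dict.
--     records = []
--     for chunk in chunks: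
--         record = {}
--         for piece in chunk:
--             for token in piece.split():
--                 if "=" in token:
--                     key, value = token.split("=", 1)
--                     record[key.strip()] = value.strip()
--         if record:
--             records.append(record)
--     return records
-- ===== Notes on version B (the rewrite author's own statement) =====
-- stated objective: alternative
-- what changed: Replaced A's single interleaved loop that mutates one growing dict while scanning lines with a two-pass pipeline: first segment the stripped non-empty lines into record chunks (flushing on digit-prefixed header lines), then parse each chunk's key=value tokens into a dict and keep the non-empty ones.
import Mathlib
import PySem

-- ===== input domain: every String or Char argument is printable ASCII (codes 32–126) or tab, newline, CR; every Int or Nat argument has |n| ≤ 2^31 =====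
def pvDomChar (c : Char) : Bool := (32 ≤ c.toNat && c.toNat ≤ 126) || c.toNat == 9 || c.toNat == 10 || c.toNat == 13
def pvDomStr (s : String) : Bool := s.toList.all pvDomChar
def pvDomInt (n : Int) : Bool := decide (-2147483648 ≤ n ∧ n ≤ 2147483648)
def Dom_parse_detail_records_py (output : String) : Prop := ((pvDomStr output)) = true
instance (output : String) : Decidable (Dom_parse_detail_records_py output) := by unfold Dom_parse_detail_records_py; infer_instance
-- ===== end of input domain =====

-- B replaces A's single interleaved loop (dict built while scanning lines) by two passes:
-- segment lines into record chunks, then parse each chunk; same return value, objective: alternative.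


-- ===== PORT A =====
-- shared primitive steps (identical source text in A and B): header test, header tail, one token
def pvIsHeader (line : String) : Bool :=
  (match line.toList with
   | c :: _ => PySem.Chars.isdigit c
   | [] => false) && PySem.Str.isIn " " line

def pvTail (line : String) : String :=
  match PySem.Str.splitMax? line " " 1 with
  | some [_, rest] => rest
  | _ => line  -- unreachable: pvIsHeader guarantees " " in line

def pvTokStep (cur : PySem.Dict String String) (token : String) : PySem.Dict String String :=
  if PySem.Str.isIn "=" token then
    match PySem.Str.splitMax? token "=" 1 with
    | some [key, value] => cur.insert (PySem.Str.strip key) (PySem.Str.strip value)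
    | _ => cur  -- unreachable: "=" in token gives exactly two parts
  else cur

def pvLineStepA (st : List (List (String × String)) × PySem.Dict String String) (raw : String) :
    List (List (String × String)) × PySem.Dict String String :=
  let line := PySem.Str.strip raw
  if line = "" then st
  else
    let records := st.1
    let current := st.2
    if pvIsHeader line then
      let records' := if current.items = [] then records else records ++ [current.items]
      ((PySem.Str.split₀ (pvTail line)).foldl pvTokStep PySem.Dict.empty |>
        fun c => (records', c))
    else
      (records, (PySem.Str.split₀ line).foldl pvTokStep current)

def parse_detail_records_py (output : String) : List (List (String × String)) :=
  let st := (PySem.Str.splitlines output).foldl pvLineStepA ([], PySem.Dict.empty)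
  if st.2.items = [] then st.1 else st.1 ++ [st.2.items]

-- ===== PORT B =====
def pvChunkStep (st : List (List String) × List String) (raw : String) :
    List (List String) × List String :=
  let line := PySem.Str.strip raw
  if line = "" then st
  else if pvIsHeader line then
    ((if st.2 = [] then st.1 else st.1 ++ [st.2]), [pvTail line])
  else
    (st.1, st.2 ++ [line])

def pvParseChunk (chunk : List String) : List (String × String) :=
  (chunk.foldl (fun d piece => (PySem.Str.split₀ piece).foldl pvTokStep d) PySem.Dict.empty).items

def parse_detail_records_py_alt (output : String) : List (List (String × String)) :=
  let st := (PySem.Str.splitlines output).foldl pvChunkStep ([], [])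
  let chunks := if st.2 = [] then st.1 else st.1 ++ [st.2]
  (chunks.map pvParseChunk).filter (fun r => r ≠ [])

-- ===== PRECONDITION & SPEC =====
def Spec_parse_detail_records_py (output : String) (out : List (List (String × String))) : Prop := out = parse_detail_records_py_alt output
instance (output : String) (out : List (List (String × String))) : Decidable (Spec_parse_detail_records_py output out) := by unfold Spec_parse_detail_records_py; infer_instance

-- ===== CLAIM (what is proved, stated in full; the proofs are below) =====
def Claim_equal_parse_detail_records_py : Prop := ∀ (output : String), Dom_parse_detail_records_py output → Spec_parse_detail_records_py output (parse_detail_records_py output)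

-- ===== LEMMAS AND PROOFS =====

-- B's chunk dict, as a Dict (pvParseChunk is its items list)
def pvDictOf (chunk : List String) : PySem.Dict String String :=
  chunk.foldl (fun d piece => (PySem.Str.split₀ piece).foldl pvTokStep d) PySem.Dict.empty

theorem pvParseChunk_eq (c : List String) : pvParseChunk c = (pvDictOf c).items := rfl

-- emitted records corresponding to a list of finished chunks
def pvEmit (chunks : List (List String)) : List (List (String × String)) :=
  (chunks.map pvParseChunk).filter (fun r => r ≠ [])

theorem pvEmit_append_one (chunks : List (List String)) (c : List String) :
    pvEmit (chunks ++ [c]) =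
      if (pvDictOf c).items = [] then pvEmit chunks else pvEmit chunks ++ [(pvDictOf c).items] := by
  simp [pvEmit, List.filter_append, pvParseChunk_eq]
  split_ifs with h <;> simp [h]

-- flushing the pending chunk: B's "append if non-empty chunk then filter" agrees with
-- A's "append the dict if non-empty"
theorem pvFlush_eq (chunks : List (List String)) (c : List String) :
    pvEmit (if c = [] then chunks else chunks ++ [c]) =
      (if (pvDictOf c).items = [] then pvEmit chunks else pvEmit chunks ++ [(pvDictOf c).items]) := by
  by_cases hc : c = []
  · simp [hc, pvDictOf, PySem.Dict.empty]
  · simp [hc, pvEmit_append_one]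

theorem pvDictOf_snoc (c : List String) (line : String) :
    pvDictOf (c ++ [line]) = (PySem.Str.split₀ line).foldl pvTokStep (pvDictOf c) := by
  simp [pvDictOf, List.foldl_append]

-- main loop invariant: A's fold is the image of B's first-pass fold
theorem pvMain (lines : List String) (chunks : List (List String)) (c : List String) :
    lines.foldl pvLineStepA (pvEmit chunks, pvDictOf c) =
      (pvEmit (lines.foldl pvChunkStep (chunks, c)).1,
       pvDictOf (lines.foldl pvChunkStep (chunks, c)).2) := by
  induction lines generalizing chunks c with
  | nil => rfl
  | cons raw rest ih =>
      simp only [List.foldl_cons]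
      by_cases hempty : PySem.Str.strip raw = ""
      · rw [show pvLineStepA (pvEmit chunks, pvDictOf c) raw = (pvEmit chunks, pvDictOf c) by
            simp [pvLineStepA, hempty],
          show pvChunkStep (chunks, c) raw = (chunks, c) by simp [pvChunkStep, hempty]]
        exact ih chunks c
      · by_cases hh : pvIsHeader (PySem.Str.strip raw) = true
        · rw [show pvLineStepA (pvEmit chunks, pvDictOf c) raw =
              (pvEmit (if c = [] then chunks else chunks ++ [c]),
               pvDictOf [pvTail (PySem.Str.strip raw)]) by
                simp [pvLineStepA, hempty, hh, pvFlush_eq, pvDictOf],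
            show pvChunkStep (chunks, c) raw =
              ((if c = [] then chunks else chunks ++ [c]), [pvTail (PySem.Str.strip raw)]) by
                simp [pvChunkStep, hempty, hh]]
          exact ih _ _
        · rw [show pvLineStepA (pvEmit chunks, pvDictOf c) raw =
              (pvEmit chunks, pvDictOf (c ++ [PySem.Str.strip raw])) by
                simp [pvLineStepA, hempty, hh, pvDictOf_snoc],
            show pvChunkStep (chunks, c) raw = (chunks, c ++ [PySem.Str.strip raw]) by
                simp [pvChunkStep, hempty, hh]]
          exact ih _ _

-- ===== VERDICT (by name: the statement is the Claim_ definition above) =====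
theorem parse_detail_records_py_spec : Claim_equal_parse_detail_records_py := by
  intro output _
  unfold Spec_parse_detail_records_py parse_detail_records_py parse_detail_records_py_alt
  have h0 : (([], PySem.Dict.empty) : List (List (String × String)) × PySem.Dict String String)
      = (pvEmit [], pvDictOf []) := rfl
  rw [h0, pvMain]
  rw [← pvFlush_eq]
  rfl
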